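-- pv_equiv track=rewrite | github.com/MTES-MCT/sparte | project/utils.py | add_total_line_column
-- ===== SOURCE A (Python) =====
-- from collections import defaultdict
--
-- def add_total_line_column(series, column=True, line=True, replace_none=False):
--     table = dict()
--     total_line = defaultdict(lambda: 0)
--     for name, data in series.items():
--         if replace_none:
--             table[name] = {y: v or 0 for y, v in data.items()}
--         else:
--             table[name] = data.copy()
--         if column:
--             # add column
--             table[name]["total"] = sum([i for i in data.values() if i])
--         if line:
--             # add cell for total line
--             for year, val in data.items():
--                 total_line[year] += val or 0
--     if column:
--         # add column total in line total
--         total_line["total"] = sum(total_line.values())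
--     if line:
--         table["Total"] = dict(total_line)
--     return table
-- ===== SOURCE B (Python) =====
-- def add_total_line_column(series, column=True, line=True, replace_none=False):
--     def make_row(data):
--         row = {y: v or 0 for y, v in data.items()} if replace_none else dict(data)
--         if column:
--             row["total"] = sum(v for v in data.values() if v)
--         return row
--
--     table = {name: make_row(data) for name, data in series.items()}
--     if line:
--         # transpose: distinct year keys in first-seen order, then sum each year across series
--         years = list(dict.fromkeys(y for data in series.values() for y in data))
--         total_row = {y: sum((data.get(y) or 0) for data in series.values()) for y in years}
--         if column:
--             total_row["total"] = sum(total_row.values())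
--         table["Total"] = total_row
--     return table
-- ===== Notes on version B (the rewrite author's own statement) =====
-- stated objective: alternative
-- what changed: Replaces the single stateful scan that accumulates a defaultdict total line while copying series with comprehension-built rows plus a transpose-style second pass: distinct year keys are collected in first-seen order and each year's total is summed across all series.
import Mathlib
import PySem

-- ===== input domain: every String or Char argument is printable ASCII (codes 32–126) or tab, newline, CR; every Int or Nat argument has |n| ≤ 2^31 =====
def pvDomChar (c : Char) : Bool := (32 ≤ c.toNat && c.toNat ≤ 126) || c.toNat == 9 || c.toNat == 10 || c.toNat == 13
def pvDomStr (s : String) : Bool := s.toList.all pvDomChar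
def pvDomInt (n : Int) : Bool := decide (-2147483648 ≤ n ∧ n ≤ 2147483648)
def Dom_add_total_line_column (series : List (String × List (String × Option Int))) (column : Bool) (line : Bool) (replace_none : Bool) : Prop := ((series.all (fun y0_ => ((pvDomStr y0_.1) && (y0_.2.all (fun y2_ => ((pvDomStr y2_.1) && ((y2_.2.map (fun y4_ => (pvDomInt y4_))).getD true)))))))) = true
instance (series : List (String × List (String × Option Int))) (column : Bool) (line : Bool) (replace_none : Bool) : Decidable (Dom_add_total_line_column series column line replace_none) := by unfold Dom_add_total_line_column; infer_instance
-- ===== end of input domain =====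

-- B replaces A's single stateful scan (defaultdict total line accumulated while copying series) by
-- comprehension-built rows plus a transpose-style second pass over distinct years; same cost, no speed claim.

-- ===== PORT A =====
-- sum([i for i in data.values() if i]): truthiness drops None and 0; since none.getD 0 = 0 is dropped too, the filter below is exact
def pvSumTruthy (data : List (String × Option Int)) : Int :=
  (((data.map (fun q => q.2)).filter (fun v => v.getD 0 != 0)).map (fun v => v.getD 0)).foldl (· + ·) 0

def add_total_line_column (series : List (String × List (String × Option Int))) (column : Bool) (line : Bool) (replace_none : Bool) : List (String × List (String × Int)) :=
  let st := series.foldl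
    (fun (st : PySem.Dict String (PySem.Dict String Int) × PySem.Dict String Int) p =>
      -- table[name] = {y: v or 0 for y, v in data.items()} if replace_none else data.copy()
      -- ('v or 0' is v.getD 0 on int/None; the copy branch is exact under Pre_, which bans None there)
      let row : PySem.Dict String Int :=
        if replace_none then PySem.Dict.ofList (p.2.map (fun q => (q.1, q.2.getD 0)))
        else PySem.Dict.ofList (p.2.map (fun q => (q.1, q.2.getD 0)))
      -- if column: table[name]["total"] = sum(...)  (mutates the row just stored by reference)
      let row := if column then row.insert "total" (pvSumTruthy p.2) else row
      -- if line: for year, val in data.items(): total_line[year] += val or 0   (defaultdict(lambda: 0))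
      let tl := if line then p.2.foldl (fun tl q => tl.modify q.1 0 (· + q.2.getD 0)) st.2 else st.2
      (st.1.insert p.1 row, tl))
    (PySem.Dict.empty, PySem.Dict.empty)
  -- if column: total_line["total"] = sum(total_line.values())
  let total_line := if column then st.2.insert "total" (st.2.values.foldl (· + ·) 0) else st.2
  -- if line: table["Total"] = dict(total_line)
  let table := if line then st.1.insert "Total" total_line else st.1
  table.items.map (fun p => (p.1, p.2.items))

-- ===== PORT B =====
def pvMakeRow (column : Bool) (replace_none : Bool) (data : List (String × Option Int)) : PySem.Dict String Int :=
  -- {y: v or 0 for y, v in data.items()} if replace_none else dict(data)  (copy exact under Pre_: no None there)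
  let row : PySem.Dict String Int :=
    if replace_none then PySem.Dict.ofList (data.map (fun q => (q.1, q.2.getD 0)))
    else PySem.Dict.ofList (data.map (fun q => (q.1, q.2.getD 0)))
  -- row["total"] = sum(v for v in data.values() if v)
  if column then
    row.insert "total" ((((data.map (fun q => q.2)).filter (fun v => v.getD 0 != 0)).map (fun v => v.getD 0)).foldl (· + ·) 0)
  else row

def add_total_line_column_alt (series : List (String × List (String × Option Int))) (column : Bool) (line : Bool) (replace_none : Bool) : List (String × List (String × Int)) :=
  -- table = {name: make_row(data) for name, data in series.items()}
  let table := PySem.Dict.ofList (series.map (fun p => (p.1, pvMakeRow column replace_none p.2)))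
  let table :=
    if line then
      -- years = list(dict.fromkeys(y for data in series.values() for y in data)): distinct keys, first-seen order
      let years : PySem.Set String :=
        PySem.Set.ofList ((series.flatMap (fun p => p.2)).map (fun q => q.1))
      -- {y: sum((data.get(y) or 0) for data in series.values()) for y in years}; years are distinct, so mk never overwrites
      let total_row : PySem.Dict String Int :=
        PySem.Dict.mk (years.map (fun y =>
          (y, series.foldl (fun acc p => acc + (((PySem.Dict.mk p.2).get? y).getD none).getD 0) 0)))
      -- total_row["total"] = sum(total_row.values())
      let total_row := if column then total_row.insert "total" (total_row.values.foldl (· + ·) 0) else total_row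
      table.insert "Total" total_row
    else table
  table.items.map (fun p => (p.1, p.2.items))

-- ===== PRECONDITION & SPEC =====
-- Pre_ excludes association lists with duplicate series names or duplicate year keys (the Python functions receive a
-- dict, in which duplicates have already collapsed, so the list representation cannot reach them faithfully), and
-- None values with replace_none=False, where A's returned table contains None — not a value of the declared int type.
def Pre_add_total_line_column (series : List (String × List (String × Option Int))) (column : Bool) (line : Bool) (replace_none : Bool) : Prop :=
  (series.map Prod.fst).Nodup ∧
  ∀ p ∈ series, (p.2.map Prod.fst).Nodup ∧ (replace_none = false → ∀ q ∈ p.2, q.2 ≠ none)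
instance (series : List (String × List (String × Option Int))) (column : Bool) (line : Bool) (replace_none : Bool) : Decidable (Pre_add_total_line_column series column line replace_none) := by unfold Pre_add_total_line_column; infer_instance
def pvWitness_add_total_line_column : (List (String × List (String × Option Int))) × Bool × Bool × Bool :=
  ([("a", [("2020", some 1), ("2021", none)]), ("b", [("2020", some 2)])], true, true, true)

def Spec_add_total_line_column (series : List (String × List (String × Option Int))) (column : Bool) (line : Bool) (replace_none : Bool) (out : List (String × List (String × Int))) : Prop := out = add_total_line_column_alt series column line replace_none
instance (series : List (String × List (String × Option Int))) (column : Bool) (line : Bool) (replace_none : Bool) (out : List (String × List (String × Int))) : Decidable (Spec_add_total_line_column series column line replace_none out) := by unfold Spec_add_total_line_column; infer_instance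

-- ===== CLAIM (what is proved, stated in full; the proofs are below) =====
def Claim_equal_add_total_line_column : Prop := ∀ (series : List (String × List (String × Option Int))) (column : Bool) (line : Bool) (replace_none : Bool), Dom_add_total_line_column series column line replace_none → Pre_add_total_line_column series column line replace_none → Spec_add_total_line_column series column line replace_none (add_total_line_column series column line replace_none)

-- ===== LEMMAS AND PROOFS =====

-- the defaultdict accumulation step of A's total line
def pvLineStep (tl : PySem.Dict String Int) (q : String × Option Int) : PySem.Dict String Int :=
  tl.modify q.1 0 (· + q.2.getD 0)

-- per-year contribution of a flat list of (year, val) pairs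
def pvS (y : String) (L : List (String × Option Int)) : Int :=
  ((L.filter (fun q => q.1 == y)).map (fun q => q.2.getD 0)).sum

lemma pv_foldl_nested {α γ δ : Type} (f : δ → γ → δ) (l : List (α × List γ)) (d : δ) :
    l.foldl (fun d p => p.2.foldl f d) d = (l.flatMap (fun p => p.2)).foldl f d := by
  induction l generalizing d with
  | nil => rfl
  | cons h t ih => simp [List.foldl_cons, List.flatMap_cons, List.foldl_append, ih]

lemma pv_foldl_addf {α : Type} (g : α → Int) (l : List α) (a : Int) :
    l.foldl (fun acc x => acc + g x) a = a + (l.map g).sum := by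
  induction l generalizing a with
  | nil => simp
  | cons h t ih => simp [List.foldl_cons, ih]; ring

lemma pv_getD_lineFold (L : List (String × Option Int)) (d : PySem.Dict String Int) (y : String) :
    (L.foldl pvLineStep d).getD y 0 = d.getD y 0 + pvS y L := by
  induction L generalizing d with
  | nil => simp [pvS]
  | cons q t ih =>
    rw [List.foldl_cons, ih]
    unfold pvLineStep pvS
    rw [PySem.Dict.getD_modify]
    by_cases h : y = q.1
    · simp [h]; ring
    · have : ¬ (q.1 = y) := fun hh => h hh.symm
      simp [h, this]

lemma pv_filter_eq_nil_of_not_mem (L : List (String × Option Int)) (y : String)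
    (h : y ∉ L.map Prod.fst) : L.filter (fun q => q.1 == y) = [] := by
  apply List.filter_eq_nil_iff.mpr
  intro q hq
  simp only [beq_iff_eq]
  intro hqy
  exact h (by simpa [hqy] using List.mem_map_of_mem (f := Prod.fst) hq)

lemma pv_colsum_data (data : List (String × Option Int)) (y : String)
    (hnd : (data.map Prod.fst).Nodup) :
    (((PySem.Dict.mk data).get? y).getD none).getD 0 = pvS y data := by
  induction data with
  | nil => simp [PySem.Dict.get?, pvS]
  | cons q t ih =>
    rw [PySem.Dict.get?_mk_cons]
    simp only [List.map_cons, List.nodup_cons] at hnd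
    by_cases h : q.1 = y
    · have ht := pv_filter_eq_nil_of_not_mem t y (h ▸ hnd.1)
      simp [pvS, h, ht]
    · have hne : (q.1 == y) = false := by simp [h]
      rw [hne]
      simp only [if_false, Bool.false_eq_true]
      rw [ih hnd.2]
      simp [pvS, hne]

lemma pvS_append (y : String) (L1 L2 : List (String × Option Int)) :
    pvS y (L1 ++ L2) = pvS y L1 + pvS y L2 := by
  simp [pvS, List.filter_append, List.map_append, List.sum_append]

lemma pv_S_flatMap (series : List (String × List (String × Option Int))) (y : String) :
    pvS y (series.flatMap (fun p => p.2)) = (series.map (fun p => pvS y p.2)).sum := by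
  induction series with
  | nil => rfl
  | cons h t ih =>
    rw [List.flatMap_cons, pvS_append, ih, List.map_cons, List.sum_cons]

-- A's accumulated total line = B's transpose-built total row
lemma pv_lineA_eq (series : List (String × List (String × Option Int)))
    (h : ∀ p ∈ series, (p.2.map Prod.fst).Nodup) :
    series.foldl (fun tl p => p.2.foldl pvLineStep tl) PySem.Dict.empty
      = PySem.Dict.mk
          ((PySem.Set.ofList ((series.flatMap (fun p => p.2)).map (fun q => q.1))).map
            (fun y => (y, series.foldl (fun acc p => acc + (((PySem.Dict.mk p.2).get? y).getD none).getD 0) 0))) := by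
  have hL : series.foldl (fun tl p => p.2.foldl pvLineStep tl) PySem.Dict.empty
      = (series.flatMap (fun p => p.2)).foldl pvLineStep PySem.Dict.empty := pv_foldl_nested _ _ _
  set L := series.flatMap (fun p => p.2) with hLdef
  have hkeys : ((L.foldl pvLineStep PySem.Dict.empty)).keys = PySem.Set.ofList (L.map Prod.fst) := by
    have := PySem.Dict.keys_foldl_modify_key (l := L) (key := Prod.fst)
      (d0 := (0 : Int)) (f := fun _ q => (· + q.2.getD 0)) (d := PySem.Dict.empty)
    simpa [pvLineStep, PySem.Dict.keys_empty, PySem.Set.update_nil_left] using this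
  have hnodup : ((L.foldl pvLineStep PySem.Dict.empty)).keys.Nodup := by
    have := PySem.Dict.nodup_keys_foldl_modify_key (l := L) (key := Prod.fst)
      (d0 := (0 : Int)) (f := fun _ q => (· + q.2.getD 0)) (d := PySem.Dict.empty)
      (h := by simp [PySem.Dict.keys_empty])
    simpa [pvLineStep] using this
  rw [hL]
  apply PySem.Dict.ext
  rw [PySem.Dict.items_eq_map_keys _ hnodup 0, hkeys]
  apply List.map_congr_left
  intro y _
  refine Prod.ext rfl ?_
  show (L.foldl pvLineStep PySem.Dict.empty).getD y 0 = _
  rw [pv_getD_lineFold, PySem.Dict.getD_empty, pv_foldl_addf]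
  have : (series.map (fun p => (((PySem.Dict.mk p.2).get? y).getD none).getD 0)).sum
      = (series.map (fun p => pvS y p.2)).sum := by
    congr 1
    exact List.map_congr_left (fun p hp => pv_colsum_data p.2 y (h p hp))
  rw [this, ← pv_S_flatMap]

lemma pv_tableB (series : List (String × List (String × Option Int))) (column replace_none : Bool) :
    PySem.Dict.ofList (series.map (fun p => (p.1, pvMakeRow column replace_none p.2)))
      = series.foldl (fun t p => t.insert p.1 (pvMakeRow column replace_none p.2)) PySem.Dict.empty := by
  simp [PySem.Dict.ofList, PySem.Dict.update, List.foldl_map]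

lemma pv_foldA (series : List (String × List (String × Option Int))) (column line replace_none : Bool)
    (a : PySem.Dict String (PySem.Dict String Int)) (b : PySem.Dict String Int) :
    series.foldl
      (fun (st : PySem.Dict String (PySem.Dict String Int) × PySem.Dict String Int) p =>
        let row : PySem.Dict String Int :=
          if replace_none then PySem.Dict.ofList (p.2.map (fun q => (q.1, q.2.getD 0)))
          else PySem.Dict.ofList (p.2.map (fun q => (q.1, q.2.getD 0)))
        let row := if column then row.insert "total" (pvSumTruthy p.2) else row
        let tl := if line then p.2.foldl (fun tl q => tl.modify q.1 0 (· + q.2.getD 0)) st.2 else st.2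
        (st.1.insert p.1 row, tl))
      (a, b)
    = (series.foldl (fun t p => t.insert p.1 (pvMakeRow column replace_none p.2)) a,
       series.foldl (fun tl p => if line then p.2.foldl pvLineStep tl else tl) b) := by
  induction series generalizing a b with
  | nil => rfl
  | cons h t ih => simp only [List.foldl_cons, ih]; rfl

-- ===== VERDICT (by name: the statement is the Claim_ definition above) =====
theorem add_total_line_column_spec : Claim_equal_add_total_line_column := by
  intro series column line replace_none _ hpre
  unfold Spec_add_total_line_column add_total_line_column add_total_line_column_alt
  rw [pv_foldA, pv_tableB]
  cases line with
  | false => simp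
  | true =>
    simp only [if_true]
    rw [pv_lineA_eq series (fun p hp => (hpre.2 p hp).1)]
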